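-- pv_equiv track=rewrite | github.com/croesuslab/RCTGAN | sdv/relational/rctgan.py | generate_letter_id
-- ===== SOURCE A (Python) =====
-- import itertools
--
-- def generate_letter_id(size):
--     liste = []
--     letters = ['a', 'b', 'c', 'd', 'e', 'f', 'g', 'h', 'i',
--                'j', 'k', 'l', 'm', 'n', 'o', 'p', 'q', 'r',
--                's', 't', 'u', 'v', 'w', 'x', 'y', 'z']
--     is_first = True
--     boolean =True
--     while boolean:
--         if is_first:
--             combin_letters = letters
--             liste += combin_letters
--             is_first = False
--         else:
--             combin_letters_list = list(itertools.product(combin_letters, letters))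
--             combin_letters = []
--             for c in combin_letters_list:
--                 combin_letters += [c[0]+c[1]]
--             liste += combin_letters
--
--         if len(liste) > size:
--             liste = liste[:size]
--             boolean = False
--     return liste
-- ===== SOURCE B (Python) =====
-- def generate_letter_id(size):
--     def to_id(n):
--         # bijective base-26 numeral of n >= 1 over 'a'..'z' ("" for n == 0)
--         return "" if n == 0 else to_id((n - 1) // 26) + chr(97 + (n - 1) % 26)
--     return [to_id(i) for i in range(1, size + 1)]
-- ===== Notes on version B (the rewrite author's own statement) =====
-- stated objective: alternative
-- what changed: B replaces A's level-by-level itertools.product construction (which materialises the whole next level of strings before truncating) by a direct bijective base-26 encoding of each index from one up to size, producing exactly size IDs.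
-- intended difference: For negative size with absolute value below the alphabet length, A's negative liste[:size] slice returns a truncated alphabet instead of no IDs, while B returns the empty list, the intended result when no IDs are requested. — e.g. on generate_letter_id(-1): A returns ["a", "b", "c", "d", "e", "f", "g", "h", "i", "j", "k", "l", "m", "n", "o", "p", "q", "r", "s", "t", "u", "v", "w", "x"…, B returns []
import Mathlib
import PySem

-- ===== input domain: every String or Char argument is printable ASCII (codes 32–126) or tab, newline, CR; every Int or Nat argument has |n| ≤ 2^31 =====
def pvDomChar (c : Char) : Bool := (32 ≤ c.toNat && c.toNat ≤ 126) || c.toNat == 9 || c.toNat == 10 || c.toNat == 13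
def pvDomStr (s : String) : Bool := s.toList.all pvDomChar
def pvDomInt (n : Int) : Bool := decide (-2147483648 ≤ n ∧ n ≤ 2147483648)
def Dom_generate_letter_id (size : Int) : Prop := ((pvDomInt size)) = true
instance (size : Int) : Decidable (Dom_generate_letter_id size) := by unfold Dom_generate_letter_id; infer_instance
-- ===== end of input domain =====

-- B replaces A's level-by-level product construction by a direct bijective base-26
-- encoding of each index 1..size (alternative algorithm; B returns [] for negative size,
-- where A's negative slice returns a truncated alphabet — see D_ below).

-- ===== PORT A =====
def lettersA : List String :=
  ["a", "b", "c", "d", "e", "f", "g", "h", "i",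
   "j", "k", "l", "m", "n", "o", "p", "q", "r",
   "s", "t", "u", "v", "w", "x", "y", "z"]

-- list(itertools.product(combin, letters)) followed by the concatenation loop
def genStep (combin : List String) : List String :=
  combin.flatMap (fun c => lettersA.map (fun l => c ++ l))

theorem genStep_len (combin : List String) :
    (genStep combin).length = 26 * combin.length := by
  simp [genStep, lettersA]; ring

-- the while loop after its first (is_first) iteration; hc is the invariant
-- that lets Lean see termination (combin is never empty)
def genLoop (size : Int) (liste combin : List String) (hc : 0 < combin.length) :
    List String :=
  if (((liste ++ genStep combin).length : Int) > size) then
    PySem.List.slice (liste ++ genStep combin) none (some size)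
  else
    genLoop size (liste ++ genStep combin) (genStep combin)
      (by rw [genStep_len]; omega)
termination_by (size + 1 - liste.length).toNat
decreasing_by
  rename_i h
  simp only [not_lt, List.length_append, genStep_len] at *
  have : (liste.length : Int) + 26 * combin.length ≤ size := by exact_mod_cast h
  omega

def generate_letter_id (size : Int) : List String :=
  -- first iteration of the while loop (is_first branch): liste += letters
  if ((([] ++ lettersA : List String).length : Int) > size) then
    PySem.List.slice ([] ++ lettersA) none (some size)
  else
    genLoop size ([] ++ lettersA) lettersA (by decide)

-- ===== PORT B =====
-- to_id(n): bijective base-26 numeral of n ≥ 1 over 'a'..'z' ("" for n == 0)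
def toId (n : Nat) : String :=
  if n = 0 then ""
  else toId ((n - 1) / 26) ++ String.singleton (Char.ofNat (97 + (n - 1) % 26))
termination_by n
decreasing_by
  have := Nat.div_le_self (n - 1) 26
  omega

-- [to_id(i) for i in range(1, size + 1)]  (range(1, size+1) = [1..size], empty for size ≤ 0)
def generate_letter_id_alt (size : Int) : List String :=
  (List.range size.toNat).map (fun i => toId (i + 1))

-- ===== PRECONDITION & SPEC =====
-- For negative size with absolute value below the alphabet length, A's negative
-- `liste[:size]` slice returns a truncated alphabet instead of no IDs; B returns [],
-- the intended result when no IDs are requested.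
def D_generate_letter_id (size : Int) : Prop := -25 ≤ size ∧ size ≤ -1
instance (size : Int) : Decidable (D_generate_letter_id size) := by
  unfold D_generate_letter_id; infer_instance

def Spec_generate_letter_id (size : Int) (out : List String) : Prop :=
  ¬ D_generate_letter_id size → out = generate_letter_id_alt size
instance (size : Int) (out : List String) : Decidable (Spec_generate_letter_id size out) := by
  unfold Spec_generate_letter_id; infer_instance

def pvDiffWitness_generate_letter_id : Int := (-1)
def pvDiffWitnessOut_generate_letter_id : (List String) × (List String) :=
  (["a", "b", "c", "d", "e", "f", "g", "h", "i",
    "j", "k", "l", "m", "n", "o", "p", "q", "r",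
    "s", "t", "u", "v", "w", "x", "y"], [])

-- ===== CLAIM (what is proved, stated in full; the proofs are below) =====
def Claim_unchanged_generate_letter_id : Prop :=
  ∀ (size : Int), Dom_generate_letter_id size →
    Spec_generate_letter_id size (generate_letter_id size)
def Claim_changed_generate_letter_id : Prop :=
  Dom_generate_letter_id (pvDiffWitness_generate_letter_id) ∧
  D_generate_letter_id (pvDiffWitness_generate_letter_id) ∧
  generate_letter_id (pvDiffWitness_generate_letter_id) = pvDiffWitnessOut_generate_letter_id.1 ∧
  generate_letter_id_alt (pvDiffWitness_generate_letter_id) = pvDiffWitnessOut_generate_letter_id.2 ∧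
  pvDiffWitnessOut_generate_letter_id.1 ≠ pvDiffWitnessOut_generate_letter_id.2
def Claim_exact_generate_letter_id : Prop :=
  ∀ (size : Int), Dom_generate_letter_id size → D_generate_letter_id size →
    generate_letter_id size ≠ generate_letter_id_alt size

-- ===== LEMMAS AND PROOFS =====

-- the successive "levels" of A: lev m = all strings of length m+1, in A's order
def lev : Nat → List String
  | 0 => lettersA
  | m + 1 => genStep (lev m)

-- cnt m = number of IDs of length ≤ m
def cnt : Nat → Nat
  | 0 => 0
  | m + 1 => 26 * (cnt m + 1)

-- pref m = concatenation of levels 0..m-1 (A's liste after m iterations)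
def pref : Nat → List String
  | 0 => []
  | m + 1 => pref m ++ lev m

theorem cnt_succ (m : Nat) : cnt (m + 1) = cnt m + 26 ^ (m + 1) := by
  induction m with
  | zero => simp [cnt]
  | succ k ih =>
      show 26 * (cnt (k + 1) + 1) = cnt (k + 1) + 26 ^ (k + 1 + 1)
      rw [pow_succ]
      simp only [cnt] at *
      omega

theorem toId_step (q b : Nat) (hb : b < 26) :
    toId (26 * q + b + 1) = toId q ++ String.singleton (Char.ofNat (97 + b)) := by
  rw [toId]
  simp [Nat.mul_add_div, Nat.mod_eq_of_lt hb, Nat.div_eq_of_lt hb]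

theorem lettersA_eq :
    lettersA = (List.range 26).map (fun b => String.singleton (Char.ofNat (97 + b))) := by
  decide

theorem range_mul26 (n : Nat) (h : Nat → String) :
    (List.range (26 * n)).map h =
      (List.range n).flatMap (fun a => (List.range 26).map (fun b => h (26 * a + b))) := by
  induction n with
  | zero => simp
  | succ k ih =>
      have e : 26 * (k + 1) = 26 * k + 26 := by ring
      rw [e, List.range_add, List.map_append, ih,
        show List.range (k + 1) = List.range k ++ [k] from List.range_succ,
        List.flatMap_append]
      simp [List.map_map, Function.comp]

theorem lev_eq (m : Nat) :
    lev m = (List.range (26 ^ (m + 1))).map (fun j => toId (cnt m + j + 1)) := by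
  induction m with
  | zero =>
      show lettersA = (List.range (26 ^ (0 + 1))).map _
      rw [lettersA_eq, show (26 : Nat) ^ (0 + 1) = 26 from rfl]
      apply List.map_congr_left
      intro b hb
      rw [List.mem_range] at hb
      rw [show cnt 0 + b + 1 = 26 * 0 + b + 1 from by simp [cnt], toId_step 0 b hb]
      rw [toId]; simp [String.singleton]
  | succ k ih =>
      show genStep (lev k) = _
      rw [genStep, ih, List.flatMap_map]
      have h26 : 26 ^ (k + 1 + 1) = 26 * 26 ^ (k + 1) := by ring
      rw [h26, range_mul26]
      congr 1
      funext a
      rw [lettersA_eq, List.map_map]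
      apply List.map_congr_left
      intro b hb
      rw [List.mem_range] at hb
      rw [show cnt (k + 1) + (26 * a + b) + 1 = 26 * (cnt k + 1 + a) + b + 1 from by
        simp [cnt]; ring, toId_step _ _ hb]
      rw [show cnt k + 1 + a = cnt k + a + 1 from by omega]
      simp [Function.comp]

theorem pref_eq (m : Nat) :
    pref m = (List.range (cnt m)).map (fun i => toId (i + 1)) := by
  induction m with
  | zero => simp [pref, cnt]
  | succ k ih =>
      show pref k ++ lev k = _
      rw [ih, lev_eq, cnt_succ, List.range_add, List.map_append, List.map_map]
      congr 1

theorem lev_pos (m : Nat) : 0 < (lev m).length := by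
  rw [lev_eq]; simp

theorem genStep_lev (m : Nat) : genStep (lev m) = lev (m + 1) := rfl

theorem cnt_lt_succ (m : Nat) : cnt m < cnt (m + 1) := by
  rw [cnt_succ]; have : 0 < 26 ^ (m + 1) := by positivity
  omega

theorem pref_len (m : Nat) : (pref m).length = cnt m := by
  rw [pref_eq]; simp

theorem slice_pref (m : Nat) (size : Int) (h0 : 0 ≤ size) (hle : size ≤ (cnt m : Int)) :
    PySem.List.slice (pref m) none (some size) = generate_letter_id_alt size := by
  rw [PySem.List.slice_to _ h0, pref_eq, generate_letter_id_alt,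
      ← List.map_take, List.take_range]
  have h : min size.toNat (cnt m) = size.toNat := by omega
  rw [h]

theorem genLoop_eq (k : Nat) : ∀ (size : Int) (m : Nat), 0 ≤ size →
    (cnt (m + 1) : Int) ≤ size → size.toNat + 1 - cnt (m + 1) ≤ k →
    genLoop size (pref (m + 1)) (lev m) (lev_pos m) = generate_letter_id_alt size := by
  induction k with
  | zero =>
      intro size m h0 hle hk
      have := cnt_lt_succ m
      omega
  | succ k ih =>
      intro size m h0 hle hk
      rw [genLoop]
      have hstep : pref (m + 1) ++ genStep (lev m) = pref (m + 2) := by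
        rw [genStep_lev]; rfl
      by_cases hc : (((pref (m + 1) ++ genStep (lev m)).length : Int) > size)
      · rw [if_pos hc, hstep]
        apply slice_pref _ _ h0
        rw [hstep, pref_len] at hc
        omega
      · rw [if_neg hc]
        have hge : (cnt (m + 2) : Int) ≤ size := by
          rw [hstep, pref_len] at hc
          omega
        have hfuel : size.toNat + 1 - cnt (m + 2) ≤ k := by
          have h1 : cnt (m + 1) < cnt (m + 2) := by simpa using cnt_lt_succ (m + 1)
          omega
        exact ih size (m + 1) h0 hge hfuel

theorem lettersA_len : (([] ++ lettersA : List String)).length = 26 := by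
  simp [lettersA]

theorem alt_neg (size : Int) (h : size < 0) : generate_letter_id_alt size = [] := by
  rw [generate_letter_id_alt, show size.toNat = 0 from by omega]
  rfl

-- ===== VERDICT (by name: the statement is the Claim_ definition above) =====
theorem generate_letter_id_spec : Claim_unchanged_generate_letter_id := by
  intro size _ hD
  unfold D_generate_letter_id at hD
  by_cases h0 : 0 ≤ size
  · rw [generate_letter_id]
    by_cases hlt : ((([] ++ lettersA : List String).length : Int) > size)
    · rw [if_pos hlt]
      exact slice_pref 1 size h0 (by rw [lettersA_len] at hlt; exact_mod_cast le_of_lt hlt)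
    · rw [if_neg hlt]
      exact genLoop_eq (size.toNat + 1) size 0 h0
        (by show ((26 : Nat) : Int) ≤ size; rw [lettersA_len] at hlt; omega) (by omega)
  · -- size < 0 and outside D_, hence size ≤ -26: both return []
    have h26 : size ≤ -26 := by omega
    obtain ⟨k, rfl, hk26⟩ : ∃ k : Nat, size = -(k : Int) ∧ 26 ≤ k :=
      ⟨(-size).toNat, by omega, by omega⟩
    rw [generate_letter_id, if_pos (by rw [lettersA_len]; omega),
      PySem.List.slice_to_neg_natCast _ k (by omega), lettersA_len,
      show 26 - k = 0 from by omega, List.take_zero, alt_neg _ (by omega)]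

theorem generate_letter_id_tight : Claim_exact_generate_letter_id := by
  intro size _ hD
  obtain ⟨h1, h2⟩ := hD
  obtain ⟨k, rfl, hk1, hk25⟩ : ∃ k : Nat, size = -(k : Int) ∧ 1 ≤ k ∧ k ≤ 25 :=
    ⟨(-size).toNat, by omega, by omega, by omega⟩
  intro heq
  rw [generate_letter_id, if_pos (by rw [lettersA_len]; omega),
    PySem.List.slice_to_neg_natCast _ k (by omega), alt_neg _ (by omega)] at heq
  have := congrArg List.length heq
  rw [List.length_take, lettersA_len] at this
  simp at this
  omega

theorem generate_letter_id_changed : Claim_changed_generate_letter_id := by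
  unfold Claim_changed_generate_letter_id; decide
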